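-- pv_equiv track=rewrite | github.com/OfficialShubhamRane/Java | Amazon/OA_1/AlgoMonster/CutoffRank.py | cut_off_rank
-- ===== SOURCE A (Python) =====
-- from typing import Counter, List
--
-- def cut_off_rank(cut_off: int, scores: List[int]) -> int:
--
--     counts = Counter(scores)
--
--     lvlups = 0
--     score = 100
--
--     while score > 0 and lvlups < cut_off:
--         lvlups += counts[score]
--         score -= 1
--
--     # now either lvlups >= cut_off (have enough players at least cut_off rank),
--
--     # or score = 0 (every non-zero player levels up)
--     return lvlups
-- ===== SOURCE B (Python) =====
-- def cut_off_rank(cut_off, scores):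
--     # walk the distinct qualifying scores in descending order, stopping once enough
--     # players have levelled up; scores outside 1..100 never level up
--     total = 0
--     for v in sorted({s for s in scores if 0 < s <= 100}, reverse=True):
--         if total >= cut_off:
--             break
--         total += scores.count(v)
--     return total
-- ===== Notes on version B (the rewrite author's own statement) =====
-- stated objective: alternative
-- what changed: Replaces A's Counter plus fixed countdown over all 100 levels by a single descending walk over the sorted distinct qualifying scores (1..100), adding each value's multiplicity until the cutoff is reached.
import Mathlib
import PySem

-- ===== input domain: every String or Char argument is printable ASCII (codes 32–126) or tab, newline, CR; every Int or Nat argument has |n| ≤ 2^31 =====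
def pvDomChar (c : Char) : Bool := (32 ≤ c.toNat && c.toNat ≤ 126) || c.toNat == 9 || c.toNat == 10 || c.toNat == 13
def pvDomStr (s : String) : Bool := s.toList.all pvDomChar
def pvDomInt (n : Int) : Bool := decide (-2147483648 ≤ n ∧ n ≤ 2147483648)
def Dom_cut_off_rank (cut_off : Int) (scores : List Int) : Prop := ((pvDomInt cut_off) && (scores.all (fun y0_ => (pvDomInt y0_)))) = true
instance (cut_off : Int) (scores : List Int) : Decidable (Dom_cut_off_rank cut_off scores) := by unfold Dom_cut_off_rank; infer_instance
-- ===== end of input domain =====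

-- B replaces A's Counter plus fixed 100-step level scan by a descending walk over the
-- distinct qualifying scores (objective: alternative decomposition, not faster).

-- ===== PORT A =====
-- the while loop: score counts down 100, 99, …; fuel s means current score = s
def pvALoop (counts : PySem.Dict Int Int) (cut_off : Int) : Nat → Int → Int
  | 0, lvlups => lvlups
  | s + 1, lvlups =>
    if lvlups < cut_off then
      pvALoop counts cut_off s (lvlups + counts.getD ((s : Int) + 1) 0)
    else lvlups

def cut_off_rank (cut_off : Int) (scores : List Int) : Int :=
  let counts := PySem.Dict.counter scores
  pvALoop counts cut_off 100 0

-- ===== PORT B =====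
-- the for loop with its break; `total >= cut_off: break` returns total
def pvBLoop (scores : List Int) (cut_off : Int) : List Int → Int → Int
  | [], total => total
  | v :: rest, total =>
    if cut_off ≤ total then total
    else pvBLoop scores cut_off rest (total + (PySem.List.count scores v : Int))

def cut_off_rank_alt (cut_off : Int) (scores : List Int) : Int :=
  let vals := PySem.List.sorted
    (PySem.Set.ofList (scores.filter (fun s => decide (0 < s ∧ s ≤ 100))))
    (fun x => x) true
  pvBLoop scores cut_off vals 0

-- ===== PRECONDITION & SPEC =====
def Spec_cut_off_rank (cut_off : Int) (scores : List Int) (out : Int) : Prop := out = cut_off_rank_alt cut_off scores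
instance (cut_off : Int) (scores : List Int) (out : Int) : Decidable (Spec_cut_off_rank cut_off scores out) := by unfold Spec_cut_off_rank; infer_instance

-- ===== CLAIM (what is proved, stated in full; the proofs are below) =====
def Claim_equal_cut_off_rank : Prop := ∀ (cut_off : Int) (scores : List Int), Dom_cut_off_rank cut_off scores → Spec_cut_off_rank cut_off scores (cut_off_rank cut_off scores)

-- ===== LEMMAS AND PROOFS =====

-- the descending list [s, s-1, …, 1] that A's while loop scans
def pvDesc : Nat → List Int
  | 0 => []
  | s + 1 => ((s : Int) + 1) :: pvDesc s

theorem pvDesc_mem (s : Nat) (v : Int) : v ∈ pvDesc s ↔ 1 ≤ v ∧ v ≤ (s : Nat) := by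
  induction s with
  | zero => simp [pvDesc]; omega
  | succ n ih => simp [pvDesc, ih]; omega

theorem pvDesc_pairwise (s : Nat) : (pvDesc s).Pairwise (· > ·) := by
  induction s with
  | zero => simp [pvDesc]
  | succ n ih =>
    refine List.pairwise_cons.mpr ⟨?_, ih⟩
    intro v hv
    have := (pvDesc_mem n v).mp hv
    omega

theorem pvBLoop_of_le (scores : List Int) (cut_off : Int) (L : List Int) (t : Int)
    (h : cut_off ≤ t) : pvBLoop scores cut_off L t = t := by
  cases L with
  | nil => rfl
  | cons v rest => simp [pvBLoop, h]

-- A's loop is B's loop over the full descending list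
theorem pvALoop_eq_pvBLoop (scores : List Int) (cut_off : Int) (s : Nat) (t : Int) :
    pvALoop (PySem.Dict.counter scores) cut_off s t = pvBLoop scores cut_off (pvDesc s) t := by
  induction s generalizing t with
  | zero => rfl
  | succ n ih =>
    simp only [pvALoop, pvBLoop, pvDesc]
    by_cases h : cut_off ≤ t
    · simp [h, not_lt.mpr h]
    · simp [h, lt_of_not_ge h, ih, PySem.Dict.getD_counter]

-- dropping absent values from the walked list does not change the loop result
theorem pvBLoop_filter (scores : List Int) (cut_off : Int) (L : List Int) (t : Int) :
    pvBLoop scores cut_off L t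
      = pvBLoop scores cut_off (L.filter (fun v => decide (v ∈ scores))) t := by
  induction L generalizing t with
  | nil => rfl
  | cons v rest ih =>
    by_cases hm : v ∈ scores
    · simp only [List.filter_cons, hm, decide_true, if_true, pvBLoop]
      by_cases h : cut_off ≤ t
      · simp [h]
      · simp [h, ih]
    · have hc : PySem.List.count scores v = 0 := by
        simpa [PySem.List.count] using List.count_eq_zero.mpr hm
      simp only [List.filter_cons, hm, decide_false, pvBLoop]
      by_cases h : cut_off ≤ t
      · rw [if_pos h, pvBLoop_of_le _ _ _ _ h]
      · rw [if_neg h, hc]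
        simpa using ih t

-- B's sorted distinct value list IS the membership filter of the descending scan list
theorem pvSorted_eq (scores : List Int) :
    PySem.List.sorted
        (PySem.Set.ofList (scores.filter (fun s => decide (0 < s ∧ s ≤ 100))))
        (fun x => x) true
      = (pvDesc 100).filter (fun v => decide (v ∈ scores)) := by
  apply PySem.List.sorted_rev_eq_of_perm_of_pairwise_gt
  · apply (List.perm_ext_iff_of_nodup ?_ ?_).mpr
    · intro v
      simp only [List.mem_filter, PySem.Set.mem_ofList, decide_eq_true_iff, pvDesc_mem]
      constructor
      · intro h
        refine ⟨h.2, by omega, ?_⟩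
        have := h.1.2; push_cast at this; omega
      · intro h
        exact ⟨⟨by omega, by push_cast; omega⟩, h.1⟩
    · exact List.Pairwise.imp (fun h => ne_of_gt h) ((pvDesc_pairwise 100).filter _)
    · exact PySem.Set.nodup_ofList _
  · exact (pvDesc_pairwise 100).filter _

theorem pv_main (cut_off : Int) (scores : List Int) :
    cut_off_rank cut_off scores = cut_off_rank_alt cut_off scores := by
  unfold cut_off_rank cut_off_rank_alt
  rw [pvALoop_eq_pvBLoop, pvBLoop_filter, pvSorted_eq]

-- ===== VERDICT (by name: the statement is the Claim_ definition above) =====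
theorem cut_off_rank_spec : Claim_equal_cut_off_rank := by
  intro cut_off scores _
  exact pv_main cut_off scores
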